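-- pv_equiv track=rewrite | github.com/wencanluo/NLPFall2013 | src/SigDial2014/scripts/SlotTracker.py | getAct
-- ===== SOURCE A (Python) =====
-- def getAct(slu, prefix = ""):#parse the action from the slu string
-- 	tokens = slu.split('&')
--
-- 	actions = []
-- 	for token in tokens:
-- 		k = token.find('(')
-- 		if k == -1: continue
--
-- 		actions.append(prefix + token[:k])
-- 	return set(actions)
-- ===== SOURCE B (Python) =====
-- def getAct(slu, prefix = ""):
--     # One pass over the characters: track the name accumulated since the last '&'
--     # and whether this segment's first '(' has already been taken.
--     actions = set()
--     name = ""
--     taken = False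
--     for ch in slu:
--         if ch == '&':
--             name = ""
--             taken = False
--         elif ch == '(':
--             if not taken:
--                 actions.add(prefix + name)
--                 taken = True
--         elif not taken:
--             name += ch
--     return actions
-- ===== Notes on version B (the rewrite author's own statement) =====
-- stated objective: alternative
-- what changed: Replaces splitting on the separator into a token list plus a find/slice pass per token by a single left-to-right character scan that tracks the name accumulated in the current segment and whether the segment's first open paren was already taken.
import Mathlib
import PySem

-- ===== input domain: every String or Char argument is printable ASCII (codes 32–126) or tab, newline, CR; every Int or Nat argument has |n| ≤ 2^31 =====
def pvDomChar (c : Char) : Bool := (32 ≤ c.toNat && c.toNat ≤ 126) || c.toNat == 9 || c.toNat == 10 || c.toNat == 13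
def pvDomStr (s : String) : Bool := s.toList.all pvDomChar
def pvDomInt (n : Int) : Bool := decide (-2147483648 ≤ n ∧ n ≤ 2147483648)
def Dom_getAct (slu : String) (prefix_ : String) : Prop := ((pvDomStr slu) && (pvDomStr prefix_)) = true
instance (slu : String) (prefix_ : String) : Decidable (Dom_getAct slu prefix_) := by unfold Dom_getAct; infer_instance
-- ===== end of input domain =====

-- B replaces the split-on-ampersand + find-open-paren pass per token by a single character scan (same result; alternative decomposition, no speed claim).


-- ===== PORT A =====
-- A: split slu on ampersands; for each token keep the prefix before its first open paren (skip tokens with none); return set(actions)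
def getAct (slu : String) (prefix_ : String) : List String :=
  let tokens : List String := (PySem.Chars.splitOn slu.toList ['&']).map String.ofList
  let actions : List String := tokens.foldl (fun actions token =>
    let k := PySem.Str.find token "("
    if k = -1 then actions
    else actions ++ [prefix_ ++ PySem.Str.slice token none (some k)]) []
  PySem.Set.ofList actions

-- ===== PORT B =====
-- one step of Source B's character scan: state = (actions so far, name accumulated in the current segment, was this segment's first open paren already taken?)
def getActScanStep (prefix_ : String) (st : PySem.Set String × List Char × Bool) (ch : Char) :
    PySem.Set String × List Char × Bool :=
  match st with
  | (acts, name, taken) =>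
    if ch = '&' then (acts, [], false)
    else if ch = '(' then
      (if taken then (acts, name, taken)
       else (PySem.Set.add acts (prefix_ ++ String.ofList name), name, true))
    else if taken then (acts, name, taken)
    else (acts, name ++ [ch], taken)

def getAct_alt (slu : String) (prefix_ : String) : List String :=
  (slu.toList.foldl (getActScanStep prefix_) (PySem.Set.empty, [], false)).1

-- ===== PRECONDITION & SPEC =====
def Spec_getAct (slu : String) (prefix_ : String) (out : List String) : Prop := out = getAct_alt slu prefix_
instance (slu : String) (prefix_ : String) (out : List String) : Decidable (Spec_getAct slu prefix_ out) := by unfold Spec_getAct; infer_instance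

-- ===== CLAIM (what is proved, stated in full; the proofs are below) =====
def Claim_equal_getAct : Prop := ∀ (slu : String) (prefix_ : String), Dom_getAct slu prefix_ → Spec_getAct slu prefix_ (getAct slu prefix_)

-- ===== LEMMAS AND PROOFS =====

-- reference splitter: splitting on the ampersand separator as structural recursion
def mySplit : List Char → List (List Char)
  | [] => [[]]
  | c :: rest =>
    if c = '&' then [] :: mySplit rest
    else
      match mySplit rest with
      | [] => [[c]]
      | h :: t => (c :: h) :: t

lemma mySplit_ne_nil (l : List Char) : mySplit l ≠ [] := by
  cases l with
  | nil => simp [mySplit]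
  | cons c rest =>
    simp only [mySplit]
    split_ifs
    · simp
    · cases h : mySplit rest <;> simp

lemma splitOn_go_eq (l : List Char) : ∀ fuel, l.length ≤ fuel → ∀ cur acc,
    PySem.Chars.splitOn.go ['&'] fuel l cur acc =
      acc.reverse ++ (match mySplit l with
        | [] => []
        | h :: t => (cur.reverse ++ h) :: t) := by
  induction l with
  | nil =>
    intro fuel _ cur acc
    cases fuel <;> simp [PySem.Chars.splitOn.go, mySplit]
  | cons c rest ih =>
    intro fuel hfuel cur acc
    cases fuel with
    | zero => simp at hfuel
    | succ f =>
      simp only [PySem.Chars.splitOn.go]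
      by_cases hc : c = '&'
      · subst hc
        have hpre : List.isPrefixOf ['&'] ('&' :: rest) = true := by
          simp [List.isPrefixOf]
        rw [if_pos hpre]
        simp only [List.length_cons] at hfuel
        simp only [List.length_singleton, List.drop_succ_cons, List.drop_zero]
        rw [ih f (by omega) [] (cur.reverse :: acc)]
        rcases h : mySplit rest with _ | ⟨h1, t1⟩
        · exact absurd h (mySplit_ne_nil rest)
        · simp [mySplit, h]
      · have hpre : List.isPrefixOf ['&'] (c :: rest) = false := by
          simp only [List.isPrefixOf, Bool.and_true, beq_eq_false_iff_ne]
          exact fun hh => hc hh.symm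
        rw [if_neg (by simp [hpre])]
        simp only [List.length_cons] at hfuel
        rw [ih f (by omega) (c :: cur) acc]
        rcases h : mySplit rest with _ | ⟨h1, t1⟩
        · exact absurd h (mySplit_ne_nil rest)
        · simp [mySplit, hc, h]

lemma splitOn_amp (cs : List Char) : PySem.Chars.splitOn cs ['&'] = mySplit cs := by
  unfold PySem.Chars.splitOn
  rw [splitOn_go_eq cs (cs.length + 1) (by omega) [] []]
  rcases h : mySplit cs with _ | ⟨h1, t1⟩
  · exact absurd h (mySplit_ne_nil cs)
  · simp

-- what A does with one token t (as chars), and what B adds for one finished segment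
def segVal (p : String) (t : List Char) : Option String :=
  if '(' ∈ t then some (p ++ String.ofList (t.takeWhile (fun x => !decide (x = '(')))) else none

def runSegs (p : String) (acts : PySem.Set String) (segs : List (List Char)) : PySem.Set String :=
  segs.foldl (fun a t =>
    match segVal p t with
    | some s => PySem.Set.add a s
    | none => a) acts

lemma singleton_prefix_iff (c : Char) (l : List Char) : [c] <+: l ↔ l.head? = some c := by
  cases l with
  | nil => simp
  | cons a r =>
    constructor
    · rintro ⟨t, ht⟩; simp_all
    · intro h; simp at h; subst h; exact ⟨r, rfl⟩

lemma take_eq_takeWhile (t : List Char) : ∀ n, n ≤ t.length →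
    (∀ i, i < n → t[i]? ≠ some '(') → (t[n]? = some '(' ∨ n = t.length) →
    t.take n = t.takeWhile (fun x => !decide (x = '(')) := by
  induction t with
  | nil =>
    intro n hn _ _
    have : n = 0 := by simpa using hn
    subst this; simp
  | cons a r ih =>
    intro n hn hlt hat
    cases n with
    | zero =>
      rcases hat with h | h
      · simp only [List.getElem?_cons_zero, Option.some_inj] at h
        subst h
        simp
      · simp at h
    | succ m =>
      have ha : a ≠ '(' := by
        have := hlt 0 (by omega)
        simpa using this
      simp only [List.take_succ_cons, List.takeWhile_cons]
      simp only [ha, decide_false, Bool.not_false, if_true]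
      rw [ih m (by simpa using hn)
        (fun i hi => by simpa using hlt (i + 1) (by omega))
        (by rcases hat with h | h
            · left; simpa using h
            · right; simpa using h)]

lemma findA_char (t : List Char) :
    (if PySem.Chars.find t ['('] = -1 then (none : Option (List Char))
     else some (PySem.List.slice t none (some (PySem.Chars.find t ['('])))) =
    (if '(' ∈ t then some (t.takeWhile (fun x => !decide (x = '('))) else none) := by
  by_cases hm : '(' ∈ t
  · have hinf : ['('] <:+: t := (List.singleton_infix_iff '(' t).mpr hm
    have hne : PySem.Chars.find t ['('] ≠ -1 := (PySem.Chars.find_ne_neg_one_iff t ['(']).mpr hinf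
    have hnonneg : 0 ≤ PySem.Chars.find t ['('] := (PySem.Chars.find_nonneg_iff t ['(']).mpr hinf
    have hle : PySem.Chars.find t ['('] ≤ t.length := PySem.Chars.find_le_length t ['(']
    obtain ⟨hpre, hmin⟩ := PySem.Chars.find_spec (s := t) (sub := ['(']) hnonneg
    rw [if_neg hne, if_pos hm, PySem.List.slice_to t hnonneg]
    congr 1
    apply take_eq_takeWhile
    · omega
    · intro i hi hsome
      exact hmin i (by omega) ((singleton_prefix_iff '(' (t.drop i)).mpr
        (by rw [List.head?_drop]; exact hsome))
    · left
      rw [← List.head?_drop]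
      exact (singleton_prefix_iff '(' _).mp hpre
  · have hinf : ¬ ['('] <:+: t := fun h => hm ((List.singleton_infix_iff '(' t).mp h)
    rw [if_pos ((PySem.Chars.find_eq_neg_one_iff t ['(']).mpr hinf), if_neg hm]

lemma ofList_foldl_segs (p : String) : ∀ (segs : List (List Char)) (l : List String),
    PySem.Set.ofList (segs.foldl (fun acc t =>
      match segVal p t with
      | some s => acc ++ [s]
      | none => acc) l) = runSegs p (PySem.Set.ofList l) segs := by
  intro segs
  induction segs with
  | nil => intro l; simp [runSegs]
  | cons t segs ih =>
    intro l
    simp only [List.foldl_cons, runSegs] at *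
    rcases h : segVal p t with _ | v
    · simp only [h]
      exact ih l
    · simp only [h]
      rw [ih (l ++ [v])]
      congr 1
      simp [PySem.Set.ofList, List.foldl_append]

lemma takeWhile_ne_append (p : List Char) (h : '(' ∉ p) (t : List Char) :
    (p ++ '(' :: t).takeWhile (fun x => !decide (x = '(')) = p := by
  induction p with
  | nil => simp
  | cons a q ih =>
    simp only [List.mem_cons, not_or] at h
    have ha : a ≠ '(' := fun e => h.1 e.symm
    simp [ha, ih h.2]

lemma step_amp (p : String) (acts : PySem.Set String) (name : List Char) (b : Bool) :
    getActScanStep p (acts, name, b) '&' = (acts, [], false) := by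
  simp [getActScanStep]

lemma step_par (p : String) (acts : PySem.Set String) (name : List Char) :
    getActScanStep p (acts, name, false) '(' =
      (PySem.Set.add acts (p ++ String.ofList name), name, true) := by
  simp [getActScanStep]

lemma step_par_taken (p : String) (acts : PySem.Set String) (name : List Char) :
    getActScanStep p (acts, name, true) '(' = (acts, name, true) := by
  simp [getActScanStep]

lemma step_other (p : String) (acts : PySem.Set String) (name : List Char) (ch : Char)
    (h1 : ch ≠ '&') (h2 : ch ≠ '(') :
    getActScanStep p (acts, name, false) ch = (acts, name ++ [ch], false) := by
  simp [getActScanStep, h1, h2]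

lemma step_other_taken (p : String) (acts : PySem.Set String) (name : List Char) (ch : Char)
    (h1 : ch ≠ '&') :
    getActScanStep p (acts, name, true) ch = (acts, name, true) := by
  simp [getActScanStep, h1]

lemma scan_inv (p : String) (cs : List Char) : ∀ acts name, '(' ∉ name →
    ((cs.foldl (getActScanStep p) (acts, name, false)).1 =
      runSegs p acts (match mySplit cs with
        | [] => [name]
        | h :: t => (name ++ h) :: t)) ∧
    ((cs.foldl (getActScanStep p) (acts, name, true)).1 =
      runSegs p acts (mySplit cs).tail) := by
  induction cs with
  | nil =>
    intro acts name hname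
    refine ⟨?_, ?_⟩
    · simp [mySplit, runSegs, segVal, hname]
    · simp [mySplit, runSegs]
  | cons ch rest ih =>
    intro acts name hname
    by_cases hamp : ch = '&'
    · subst hamp
      refine ⟨?_, ?_⟩ <;>
      · simp only [List.foldl_cons, step_amp]
        rw [(ih acts [] (by simp)).1]
        rcases h : mySplit rest with _ | ⟨h1, t1⟩
        · exact absurd h (mySplit_ne_nil rest)
        · simp [mySplit, h, runSegs, segVal, hname]
    · by_cases hpar : ch = '('
      · subst hpar
        rcases h : mySplit rest with _ | ⟨h1, t1⟩
        · exact absurd h (mySplit_ne_nil rest)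
        refine ⟨?_, ?_⟩
        · simp only [List.foldl_cons, step_par]
          rw [(ih _ name hname).2]
          have hseg : segVal p (name ++ '(' :: h1) = some (p ++ String.ofList name) := by
            simp only [segVal, takeWhile_ne_append name hname h1]
            rw [if_pos (by simp)]
          simp [mySplit, h, runSegs, hseg]
        · simp only [List.foldl_cons, step_par_taken]
          rw [(ih acts name hname).2]
          simp [mySplit, h]
      · rcases h : mySplit rest with _ | ⟨h1, t1⟩
        · exact absurd h (mySplit_ne_nil rest)
        refine ⟨?_, ?_⟩
        · simp only [List.foldl_cons, step_other p acts name ch hamp hpar]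
          rw [(ih acts (name ++ [ch]) (by simp [hname, Ne.symm hpar])).1]
          simp [mySplit, hamp, h]
        · simp only [List.foldl_cons, step_other_taken p acts name ch hamp]
          rw [(ih acts name hname).2]
          simp [mySplit, hamp, h]

theorem getAct_eq (slu prefix_ : String) : getAct slu prefix_ = getAct_alt slu prefix_ := by
  show PySem.Set.ofList
      (((PySem.Chars.splitOn slu.toList ['&']).map String.ofList).foldl
        (fun actions token =>
          let k := PySem.Str.find token "("
          if k = -1 then actions
          else actions ++ [prefix_ ++ PySem.Str.slice token none (some k)]) []) =
    (slu.toList.foldl (getActScanStep prefix_) (PySem.Set.empty, [], false)).1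
  rw [splitOn_amp, List.foldl_map]
  have hfun : (fun (actions : List String) (t : List Char) =>
      (fun (actions : List String) (token : String) =>
        let k := PySem.Str.find token "("
        if k = -1 then actions
        else actions ++ [prefix_ ++ PySem.Str.slice token none (some k)]) actions (String.ofList t)) =
      (fun (acc : List String) (t : List Char) =>
        match segVal prefix_ t with
        | some s => acc ++ [s]
        | none => acc) := by
    funext acc t
    simp only [PySem.Str.find, PySem.Str.slice, String.toList_ofList, segVal,
      show ("(" : String).toList = ['('] from by decide]
    have h := findA_char t
    by_cases hk : PySem.Chars.find t ['('] = -1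
    · rw [if_pos hk] at h ⊢
      by_cases hm : '(' ∈ t
      · rw [if_pos hm] at h; exact absurd h (by simp)
      · rw [if_neg hm]
    · rw [if_neg hk] at h ⊢
      by_cases hm : '(' ∈ t
      · rw [if_pos hm] at h
        simp only [Option.some_inj] at h
        rw [show PySem.Chars.slice t none (some (PySem.Chars.find t ['('])) =
              PySem.List.slice t none (some (PySem.Chars.find t ['('])) from rfl, h]
        simp [hm]
      · rw [if_neg hm] at h; exact absurd h (by simp)
  rw [hfun, ofList_foldl_segs]
  have hb := (scan_inv prefix_ slu.toList PySem.Set.empty [] (by simp)).1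
  rw [hb]
  rcases h : mySplit slu.toList with _ | ⟨h1, t1⟩
  · exact absurd h (mySplit_ne_nil _)
  · simp [PySem.Set.ofList, PySem.Set.empty]

-- ===== VERDICT (by name: the statement is the Claim_ definition above) =====
theorem getAct_spec : Claim_equal_getAct := by
  intro slu prefix_ _
  unfold Spec_getAct
  exact getAct_eq slu prefix_
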